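-- pv_equiv track=rewrite | github.com/ecdiazl/mining-equipment-search | src/parsers/confidence_scorer.py | _matches_domain_set
-- ===== SOURCE A (Python) =====
-- def _matches_domain_set(domain: str, domain_set: set[str]) -> bool:
--     """Verifica si un dominio coincide con alguno del set (incluyendo subdominios).
--     Uses O(1) set lookups by walking up the domain hierarchy."""
--     if domain in domain_set:
--         return True
--     # Walk up the domain hierarchy: sub.example.com → example.com → com
--     parts = domain.split(".")
--     for i in range(1, len(parts)):
--         parent = ".".join(parts[i:])
--         if parent in domain_set:
--             return True
--     return False
-- ===== SOURCE B (Python) =====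
-- def _matches_domain_set(domain: str, domain_set: set[str]) -> bool:
--     """Match if the domain equals an entry or is a subdomain of one (dot-boundary suffix)."""
--     return any(domain == d or domain.endswith("." + d) for d in domain_set)
-- ===== Notes on version B (the rewrite author's own statement) =====
-- stated objective: idiomatic
-- what changed: B iterates over the set and tests each entry d with a single dot-boundary suffix check (domain == d or domain.endswith('.'+d)), instead of splitting the domain and walking up its label hierarchy with a set lookup per suffix.
import Mathlib
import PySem

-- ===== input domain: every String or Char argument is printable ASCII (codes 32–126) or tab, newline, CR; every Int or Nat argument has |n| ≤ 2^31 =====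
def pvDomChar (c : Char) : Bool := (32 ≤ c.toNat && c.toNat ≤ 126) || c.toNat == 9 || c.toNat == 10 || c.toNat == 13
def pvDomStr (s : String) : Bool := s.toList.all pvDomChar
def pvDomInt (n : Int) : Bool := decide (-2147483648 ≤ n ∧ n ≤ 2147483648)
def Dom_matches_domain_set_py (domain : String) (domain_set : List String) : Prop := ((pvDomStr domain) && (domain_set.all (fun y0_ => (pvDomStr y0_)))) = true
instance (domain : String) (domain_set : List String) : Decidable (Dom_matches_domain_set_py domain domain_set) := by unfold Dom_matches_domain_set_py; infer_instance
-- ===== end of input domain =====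

-- B replaces A's walk up the domain's label hierarchy (split + per-suffix set lookup) by a
-- single pass over the set testing `domain == d or domain.endswith('.'+d)` — shorter and more
-- idiomatic, same result (equivalence proved below; no speed claim).

-- ===== PORT A =====
def matches_domain_set_py (domain : String) (domain_set : List String) : Bool :=
  if PySem.Set.contains domain_set domain then true
  else
    let parts := (PySem.Str.split? domain ".").getD []
    (PySem.List.pyRange 1 (parts.length : Int)).any (fun i =>
      PySem.Set.contains domain_set
        (PySem.Str.join "." (PySem.List.slice parts (some i) none)))

-- ===== PORT B =====
def matches_domain_set_py_alt (domain : String) (domain_set : List String) : Bool :=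
  domain_set.any (fun d => domain == d || PySem.Str.endswith domain ("." ++ d))

-- ===== PRECONDITION & SPEC =====
def Spec_matches_domain_set_py (domain : String) (domain_set : List String) (out : Bool) : Prop := out = matches_domain_set_py_alt domain domain_set
instance (domain : String) (domain_set : List String) (out : Bool) : Decidable (Spec_matches_domain_set_py domain domain_set out) := by unfold Spec_matches_domain_set_py; infer_instance

-- ===== CLAIM (what is proved, stated in full; the proofs are below) =====
def Claim_equal_matches_domain_set_py : Prop := ∀ (domain : String) (domain_set : List String), Dom_matches_domain_set_py domain domain_set → Spec_matches_domain_set_py domain domain_set (matches_domain_set_py domain domain_set)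

-- ===== LEMMAS AND PROOFS =====

def pvSplit : List Char → List (List Char)
  | [] => [[]]
  | c :: r =>
    if c = '.' then [] :: pvSplit r
    else
      match pvSplit r with
      | [] => [[c]]
      | p :: ps => (c :: p) :: ps
def pvConsFirst (x : List Char) : List (List Char) → List (List Char)
  | [] => [x]
  | p :: ps => (x ++ p) :: ps
theorem pvSplit_ne_nil (cs : List Char) : pvSplit cs ≠ [] := by
  cases cs with
  | nil => simp [pvSplit]
  | cons c r =>
    simp only [pvSplit]
    split
    · simp
    · cases h : pvSplit r <;> simp

theorem pv_go_spec (fuel : Nat) : ∀ (l cur : List Char) (acc' : List (List Char)),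
    l.length ≤ fuel →
    PySem.Chars.splitOn.go ['.'] fuel l cur acc' = acc'.reverse ++ pvConsFirst cur.reverse (pvSplit l) := by
  induction fuel with
  | zero =>
    intro l cur acc' hl
    have : l = [] := by simpa using hl
    subst this
    simp [PySem.Chars.splitOn.go, pvSplit, pvConsFirst]
  | succ fuel ih =>
    intro l cur acc' hl
    cases l with
    | nil => simp [PySem.Chars.splitOn.go, pvSplit, pvConsFirst]
    | cons c rest =>
      rw [PySem.Chars.splitOn.go]
      by_cases hc : c = '.'
      · subst hc
        have hpre : List.isPrefixOf ['.'] ('.' :: rest) = true := by simp [List.isPrefixOf]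
        simp only [hpre, if_pos, List.length_cons, List.drop_succ_cons, List.length_nil, List.drop_zero]
        rw [ih rest [] (cur.reverse :: acc') (by simpa using Nat.le_of_succ_le_succ (by simpa using hl))]
        simp [pvSplit, pvConsFirst]
        cases h : pvSplit rest with
        | nil => exact absurd h (pvSplit_ne_nil rest)
        | cons p ps => simp [pvConsFirst]
      · have hpre : List.isPrefixOf ['.'] (c :: rest) = false := by
          simp [List.isPrefixOf]
          exact fun h => hc h.symm
        simp only [hpre, if_neg, Bool.false_eq_true, not_false_iff, ite_false]
        rw [ih rest (c :: cur) acc' (by simpa using Nat.le_of_succ_le_succ (by simpa using hl))]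
        simp only [pvSplit, if_neg hc]
        cases h : pvSplit rest with
        | nil => exact absurd h (pvSplit_ne_nil rest)
        | cons p ps => simp [pvConsFirst, h]

theorem pvSplitOn_eq (cs : List Char) : PySem.Chars.splitOn cs ['.'] = pvSplit cs := by
  rw [PySem.Chars.splitOn, pv_go_spec (cs.length + 1) cs [] [] (by omega)]
  cases h : pvSplit cs with
  | nil => exact absurd h (pvSplit_ne_nil cs)
  | cons p ps => simp [pvConsFirst]

theorem pvJoin_pvSplit (cs : List Char) : PySem.Chars.join ['.'] (pvSplit cs) = cs := by
  induction cs with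
  | nil => simpa [pvSplit] using PySem.Chars.join_singleton (sep := ['.']) (a := [])
  | cons c r ih =>
    simp only [pvSplit]
    by_cases hc : c = '.'
    · subst hc
      rw [if_pos rfl]
      cases h : pvSplit r with
      | nil => exact absurd h (pvSplit_ne_nil r)
      | cons p ps =>
        rw [h] at ih
        rw [PySem.Chars.join_cons_cons]
        simpa [PySem.Chars.join] using ih
    · rw [if_neg hc]
      cases h : pvSplit r with
      | nil => exact absurd h (pvSplit_ne_nil r)
      | cons p ps =>
        rw [h] at ih
        cases ps with
        | nil => simpa [PySem.Chars.join_singleton] using ih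
        | cons q qs =>
          rw [PySem.Chars.join_cons_cons] at ih ⊢
          simpa using ih

theorem pvSuffix_of_drop (cs : List Char) : ∀ i : Nat, 1 ≤ i → i < (pvSplit cs).length →
    ('.' :: PySem.Chars.join ['.'] ((pvSplit cs).drop i)) <:+ cs := by
  induction cs with
  | nil => intro i h1 h2; simp [pvSplit] at h2; omega
  | cons c r ih =>
    intro i h1 h2
    by_cases hc : c = '.'
    · subst hc
      simp only [pvSplit, eq_self_iff_true, if_true] at h2 ⊢
      rcases Nat.eq_or_lt_of_le h1 with h | h
      · subst h
        simp [pvJoin_pvSplit]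
      · have h1' : 1 ≤ i - 1 := by omega
        have h2' : i - 1 < (pvSplit r).length := by
          simp only [List.length_cons] at h2; omega
        have := ih (i - 1) h1' h2'
        have hdrop : (([] : List Char) :: pvSplit r).drop i = (pvSplit r).drop (i - 1) := by
          obtain ⟨j, rfl⟩ : ∃ j, i = j + 1 := ⟨i - 1, by omega⟩
          simp
        rw [hdrop]
        exact this.trans (List.suffix_cons _ _)
    · cases h : pvSplit r with
      | nil => exact absurd h (pvSplit_ne_nil r)
      | cons p ps =>
        simp only [pvSplit, if_neg hc, h] at h2 ⊢
        simp only [List.length_cons] at h2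
        have hdrop : ((c :: p) :: ps).drop i = (p :: ps).drop i := by
          obtain ⟨j, rfl⟩ : ∃ j, i = j + 1 := ⟨i - 1, by omega⟩
          simp
        rw [hdrop]
        have := ih i h1 (by rw [h]; simpa using h2)
        rw [h] at this
        exact this.trans (List.suffix_cons _ _)

theorem pvDrop_of_suffix (cs t : List Char) : ('.' :: t) <:+ cs →
    ∃ i : Nat, 1 ≤ i ∧ i < (pvSplit cs).length ∧ PySem.Chars.join ['.'] ((pvSplit cs).drop i) = t := by
  induction cs with
  | nil => intro h; exact absurd (List.IsSuffix.length_le h) (by simp)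
  | cons c r ih =>
    intro h
    rcases List.suffix_cons_iff.mp h with heq | hsuf
    · obtain ⟨hc, ht⟩ : c = '.' ∧ t = r := by
        have h1 := congrArg (·.headI) heq
        have h2 := congrArg (·.tail) heq
        simp at h1 h2
        exact ⟨h1.symm, h2⟩
      subst hc; subst ht
      refine ⟨1, le_refl 1, ?_, ?_⟩
      · simp only [pvSplit, eq_self_iff_true, if_true, List.length_cons]
        have := List.length_pos_iff.mpr (pvSplit_ne_nil t)
        omega
      · simp only [pvSplit, eq_self_iff_true, if_true, List.drop_succ_cons, List.drop_zero]
        exact pvJoin_pvSplit _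
    · rcases ih hsuf with ⟨i, h1, h2, h3⟩
      by_cases hc : c = '.'
      · subst hc
        refine ⟨i + 1, by omega, ?_, ?_⟩
        · simp [pvSplit]; omega
        · simp only [pvSplit, if_pos rfl, List.drop_succ_cons]; exact h3
      · cases hp : pvSplit r with
        | nil => exact absurd hp (pvSplit_ne_nil r)
        | cons p ps =>
          refine ⟨i, h1, ?_, ?_⟩
          · simp only [pvSplit, if_neg hc, hp, List.length_cons]
            rw [hp] at h2; simpa using h2
          · simp only [pvSplit, if_neg hc, hp]
            rw [hp] at h3
            obtain ⟨j, rfl⟩ : ∃ j, i = j + 1 := ⟨i - 1, by omega⟩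
            simpa using h3

-- ===== VERDICT (by name: the statement is the Claim_ definition above) =====
theorem pv_main (domain : String) (ds : List String) :
    matches_domain_set_py domain ds = matches_domain_set_py_alt domain ds := by
  cases hs : PySem.Str.split? domain "." with
  | none =>
    exfalso
    have h0 := PySem.Str.split?_map domain "."
    rw [hs] at h0
    simp [PySem.Chars.split?] at h0
  | some parts =>
    have hparts : parts.map String.toList = pvSplit domain.toList := by
      have h0 := PySem.Str.split?_map domain "."
      rw [hs, show (".":String).toList = ['.'] from rfl] at h0
      simpa [PySem.Chars.split?, pvSplitOn_eq] using h0
    have hlen : parts.length = (pvSplit domain.toList).length := by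
      rw [← hparts, List.length_map]
    have hA : matches_domain_set_py domain ds = true ↔
        (domain ∈ ds ∨ ∃ i : Int, (1 ≤ i ∧ i < (parts.length : Int)) ∧
          PySem.Str.join "." (PySem.List.slice parts (some i) none) ∈ ds) := by
      simp [matches_domain_set_py, hs, List.any_eq_true, PySem.Set.contains_iff,
        PySem.List.mem_pyRange_one]
    have hB : matches_domain_set_py_alt domain ds = true ↔
        (∃ d ∈ ds, domain = d ∨ ('.' :: d.toList) <:+ domain.toList) := by
      simp [matches_domain_set_py_alt, List.any_eq_true, beq_iff_eq,
        PySem.Str.endswith_eq, PySem.Chars.endswith_iff, String.toList_append]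
    rw [Bool.eq_iff_iff, hA, hB]
    constructor
    · rintro (hmem | ⟨i, ⟨hi1, hi2⟩, hmem⟩)
      · exact ⟨domain, hmem, Or.inl rfl⟩
      · refine ⟨_, hmem, Or.inr ?_⟩
        have h0 : (0:Int) ≤ i := by omega
        rw [PySem.List.slice_from parts h0]
        have hj1 : 1 ≤ i.toNat := by omega
        have hj2 : i.toNat < (pvSplit domain.toList).length := by omega
        have hdl : (PySem.Str.join "." (parts.drop i.toNat)).toList
            = PySem.Chars.join ['.'] ((pvSplit domain.toList).drop i.toNat) := by
          rw [PySem.Str.toList_join, show (".":String).toList = ['.'] from rfl,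
            List.map_drop, hparts]
        rw [hdl]
        exact pvSuffix_of_drop domain.toList i.toNat hj1 hj2
    · rintro ⟨d, hd, heq | hsuf⟩
      · exact Or.inl (heq ▸ hd)
      · rcases pvDrop_of_suffix domain.toList d.toList hsuf with ⟨j, hj1, hj2, hj3⟩
        refine Or.inr ⟨(j : Int), ⟨by omega, by omega⟩, ?_⟩
        have h0 : (0:Int) ≤ (j : Int) := by omega
        rw [PySem.List.slice_from parts h0]
        have : PySem.Str.join "." (parts.drop (j:Int).toNat) = d := by
          rw [← String.toList_inj, PySem.Str.toList_join,
            show (".":String).toList = ['.'] from rfl, List.map_drop, hparts]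
          simpa using hj3
        rw [this]
        exact hd

theorem matches_domain_set_py_spec : Claim_equal_matches_domain_set_py := by
  intro domain ds _
  unfold Spec_matches_domain_set_py
  exact pv_main domain ds
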